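-- pv_equiv track=rewrite | github.com/wisoniamir/Genesis-FINAL-TRY | modules/restored/width.py | optimizeWidthsBruteforce
-- ===== SOURCE A (Python) =====
-- from collections import defaultdict
--
-- def byteCost(widths, default, nominal):
--     if not hasattr(widths, "items"):
--         d = defaultdict(int)
--         for w in widths:
--             d[w] += 1
--         widths = d
--
--     cost = 0
--     for w, freq in widths.items():
--         if w == default:
--             continue
--         diff = abs(w - nominal)
--         if diff <= 107:
--             cost += freq
--         elif diff <= 1131:
--             cost += freq * 2
--         else:
--             cost += freq * 5
--     return cost
--
-- def optimizeWidthsBruteforce(widths):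
--     """Bruteforce version.  Veeeeeeeeeeeeeeeeery slow.  Only works for smallests of fonts."""
--
--     d = defaultdict(int)
--     for w in widths:
--         d[w] += 1
--
--     # Maximum number of bytes using default can possibly save
--     maxDefaultAdvantage = 5 * max(d.values())
--
--     minw, maxw = min(widths), max(widths)
--     domain = list(range(minw, maxw + 1))
--
--     bestCostWithoutDefault = min(byteCost(widths, None, nominal) for nominal in domain)
--
--     bestCost = len(widths) * 5 + 1
--     for nominal in domain:
--         if byteCost(widths, None, nominal) > bestCost + maxDefaultAdvantage:
--             continue
--         for default in domain:
--             cost = byteCost(widths, default, nominal)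
--             if cost < bestCost:
--                 bestCost = cost
--                 bestDefault = default
--                 bestNominal = nominal
--
--     return bestDefault, bestNominal
-- ===== SOURCE B (Python) =====
-- from collections import Counter
--
-- def optimizeWidthsBruteforce(widths):
--     """O(W*U) exact rewrite: per nominal, subtract the best single-width saving
--     instead of rescanning every default (W = range width, U = distinct widths)."""
--     freqs = Counter(widths)
--
--     def piece(d):
--         return 1 if d <= 107 else (2 if d <= 1131 else 5)
--
--     def candidate(nominal):
--         base = 0
--         for w, f in freqs.items():
--             base += f * piece(abs(w - nominal))
--         default = max(freqs, key=lambda w: (freqs[w] * piece(abs(w - nominal)), -w))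
--         return base - freqs[default] * piece(abs(default - nominal)), nominal, default
--
--     cost, nominal, default = min(
--         (candidate(n) for n in range(min(widths), max(widths) + 1)),
--         key=lambda t: t[0])
--     return default, nominal
-- ===== Notes on version B (the rewrite author's own statement) =====
-- stated objective: faster
-- what changed: Instead of A's inner brute-force scan over every candidate default for every nominal (re-counting the widths inside every byteCost call), B computes per nominal the no-default cost in one pass over the pre-built Counter and subtracts the single best per-width saving (lex-max of (saving, -width)), then takes the first cost-minimal nominal.
import Mathlib
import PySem

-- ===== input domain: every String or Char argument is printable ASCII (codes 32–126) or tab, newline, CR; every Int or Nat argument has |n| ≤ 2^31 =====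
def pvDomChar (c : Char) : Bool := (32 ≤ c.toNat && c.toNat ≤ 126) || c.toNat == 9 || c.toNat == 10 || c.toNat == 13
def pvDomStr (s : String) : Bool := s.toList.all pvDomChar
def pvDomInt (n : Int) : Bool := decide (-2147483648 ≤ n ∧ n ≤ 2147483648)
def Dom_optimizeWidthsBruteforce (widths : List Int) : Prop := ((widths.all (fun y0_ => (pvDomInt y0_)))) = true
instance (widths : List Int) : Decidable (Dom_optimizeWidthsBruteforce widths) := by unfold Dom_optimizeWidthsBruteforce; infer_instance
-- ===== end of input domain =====

-- B replaces A's inner scan over all defaults by picking, per nominal, the single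
-- width with the largest savings (lex-max of (reduction, -w)) — an O(W*U) exact
-- rewrite of A's O(W^2*U) double loop (objective: faster).


-- ===== PORT A =====
-- byteCost(widths, default, nominal): widths arrives as the list, is counted into a dict each call
def pvByteCost (widths : List Int) (default : Option Int) (nominal : Int) : Int :=
  let d := PySem.Dict.counter widths
  d.items.foldl (fun cost wf =>
    if some wf.1 = default then cost
    else
      let diff := |wf.1 - nominal|
      if diff ≤ 107 then cost + wf.2
      else if diff ≤ 1131 then cost + wf.2 * 2
      else cost + wf.2 * 5) 0

def optimizeWidthsBruteforce (widths : List Int) : Int × Int :=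
  let d := PySem.Dict.counter widths
  match PySem.List.max? d.values (fun v => v) with
  | none => (0, 0)      -- widths = []: Python raises ValueError (outside Pre_)
  | some mx =>
    let maxDefaultAdvantage := 5 * mx
    match PySem.List.min? widths (fun x => x), PySem.List.max? widths (fun x => x) with
    | some minw, some maxw =>
      let domain := PySem.List.pyRange minw (maxw + 1) 1
      let _bestCostWithoutDefault :=
        PySem.List.min? (domain.map (fun nominal => pvByteCost widths none nominal)) (fun x => x)
      let s := domain.foldl (fun s nominal =>
        if pvByteCost widths none nominal > s.1 + maxDefaultAdvantage then s
        else domain.foldl (fun s default =>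
          let cost := pvByteCost widths (some default) nominal
          if cost < s.1 then (cost, some default, some nominal) else s) s)
        (((widths.length : Int) * 5 + 1, none, none) : Int × Option Int × Option Int)
      (s.2.1.getD 0, s.2.2.getD 0)   -- .getD 0 is unreachable on Pre_ (Python: NameError)
    | _, _ => (0, 0)     -- unreachable: widths nonempty here

-- ===== PORT B =====
def pvPiece (d : Int) : Int := if d ≤ 107 then 1 else if d ≤ 1131 then 2 else 5

-- candidate(nominal): total cost with no default, minus the best single-width saving
-- (the .getD 0 fallbacks are unreachable on Pre_: Python's max/min raise on an empty sequence)
def pvCandidate (freqs : PySem.Dict Int Int) (nominal : Int) : Int × Int × Int :=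
  let base := freqs.items.foldl (fun b wf => b + wf.2 * pvPiece |wf.1 - nominal|) 0
  let default := (PySem.List.max2? freqs.keys
      (fun w => freqs.getD w 0 * pvPiece |w - nominal|) (fun w => -w)).getD 0
  (base - freqs.getD default 0 * pvPiece |default - nominal|, nominal, default)

def optimizeWidthsBruteforce_alt (widths : List Int) : Int × Int :=
  let freqs := PySem.Dict.counter widths
  let best := (PySem.List.min? widths (fun x => x)).bind (fun lo =>
    (PySem.List.max? widths (fun x => x)).bind (fun hi =>
      PySem.List.min?
        ((PySem.List.pyRange lo (hi + 1) 1).map (fun n => pvCandidate freqs n))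
        (fun t => t.1)))
  (best.map (fun t => (t.2.2, t.2.1))).getD (0, 0)

-- ===== PRECONDITION & SPEC =====
-- Pre_ excludes only the empty list, on which Python A raises ValueError (min of empty sequence).
def Pre_optimizeWidthsBruteforce (widths : List Int) : Prop := widths ≠ []
instance (widths : List Int) : Decidable (Pre_optimizeWidthsBruteforce widths) := by
  unfold Pre_optimizeWidthsBruteforce; infer_instance
def pvWitness_optimizeWidthsBruteforce : List Int := [1, 1, 300]

def Spec_optimizeWidthsBruteforce (widths : List Int) (out : Int × Int) : Prop := out = optimizeWidthsBruteforce_alt widths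
instance (widths : List Int) (out : Int × Int) : Decidable (Spec_optimizeWidthsBruteforce widths out) := by unfold Spec_optimizeWidthsBruteforce; infer_instance

-- ===== CLAIM (what is proved, stated in full; the proofs are below) =====
def Claim_equal_optimizeWidthsBruteforce : Prop := ∀ (widths : List Int), Dom_optimizeWidthsBruteforce widths → Pre_optimizeWidthsBruteforce widths → Spec_optimizeWidthsBruteforce widths (optimizeWidthsBruteforce widths)

-- ===== LEMMAS AND PROOFS =====

-- savings a default w would bring at a given nominal (0 if w is not a width)
def pvRed (widths : List Int) (n w : Int) : Int := (widths.count w : Int) * pvPiece (|w - n|)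
-- byteCost with no default
def pvBase (widths : List Int) (n : Int) : Int :=
  ((PySem.Set.ofList widths : List Int).map (pvRed widths n)).sum

def pvMinsel {α : Type} (g : α → Int) (m x : α) : α := if g x < g m then x else m
def pvStepSel {α β : Type} (g : α → Int) (h : α → β) (s : Int × β) (m : α) : Int × β :=
  if g m < s.1 then (g m, h m) else s
def pvMaxsel (k1 k2 : Int → Int) (m x : Int) : Int :=
  if (decide (k1 m < k1 x) || !decide (k1 x < k1 m) && decide (k2 m < k2 x)) = true then x else m

-- B's chosen default at a given nominal
def pvW (widths : List Int) (n : Int) : Int :=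
  (PySem.List.max2? (PySem.Set.ofList widths : List Int)
    (fun w => pvRed widths n w) (fun w => -w)).getD 0

theorem pvStep_stepSel {α β : Type} (g : α → Int) (h : α → β) (s : Int × β) (m : α) (x : α) :
    (if g x < (pvStepSel g h s m).1 then (g x, h x) else pvStepSel g h s m)
      = pvStepSel g h s (pvMinsel g m x) := by
  simp only [pvStepSel, pvMinsel]
  split_ifs <;> simp_all <;> omega

theorem pvFoldl_stepSel {α β : Type} (g : α → Int) (h : α → β) (t : List α) :
    ∀ (m : α) (s : Int × β),
    t.foldl (fun s x => if g x < s.1 then (g x, h x) else s) (pvStepSel g h s m)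
      = pvStepSel g h s (t.foldl (pvMinsel g) m) := by
  induction t with
  | nil => intro m s; rfl
  | cons x t ih =>
    intro m s
    simp only [List.foldl_cons]
    rw [pvStep_stepSel g h s m x]; exact ih _ s

theorem pvFoldl_cons_stepSel {α β : Type} (g : α → Int) (h : α → β) (x : α) (t : List α) (s : Int × β) :
    (x :: t).foldl (fun s x => if g x < s.1 then (g x, h x) else s) s
      = pvStepSel g h s (t.foldl (pvMinsel g) x) := by
  simp only [List.foldl_cons]
  have : (if g x < s.1 then ((g x, h x) : Int × β) else s) = pvStepSel g h s x := rfl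
  rw [this]; exact pvFoldl_stepSel g h t x s

theorem pvFoldl_some_sel {α : Type} (f : Option α → α → Option α) (sel : α → α → α)
    (hf : ∀ m x, f (some m) x = some (sel m x)) :
    ∀ (t : List α) (m : α), t.foldl f (some m) = some (t.foldl sel m) := by
  intro t
  induction t with
  | nil => intro m; rfl
  | cons x t ih => intro m; simp only [List.foldl_cons, hf]; exact ih _

theorem pvMin?_cons {α : Type} (g : α → Int) (x : α) (t : List α) :
    PySem.List.min? (x :: t) g = some (t.foldl (pvMinsel g) x) := by
  simp only [PySem.List.min?, List.foldl_cons]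
  exact pvFoldl_some_sel _ (pvMinsel g) (fun m x => by simp only [pvMinsel]; split_ifs <;> rfl) t x

theorem pvMax2?_cons (k1 k2 : Int → Int) (x : Int) (t : List Int) :
    PySem.List.max2? (x :: t) k1 k2 = some (t.foldl (pvMaxsel k1 k2) x) := by
  simp only [PySem.List.max2?, List.foldl_cons]
  exact pvFoldl_some_sel _ (pvMaxsel k1 k2) (fun m x => by simp only [pvMaxsel]; split_ifs <;> rfl) t x

theorem pvMin?_map {γ : Type} (f : Int → γ) (k : γ → Int) (l : List Int) :
    PySem.List.min? (l.map f) k = Option.map f (PySem.List.min? l (fun x => k (f x))) := by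
  cases l with
  | nil => rfl
  | cons x t =>
    rw [List.map_cons, pvMin?_cons, pvMin?_cons, Option.map_some]
    congr 1
    rw [List.foldl_map]
    induction t generalizing x with
    | nil => rfl
    | cons y t ih =>
      simp only [List.foldl_cons]
      have : pvMinsel k (f x) (f y) = f (pvMinsel (fun x => k (f x)) x y) := by
        simp only [pvMinsel]; split_ifs <;> rfl
      rw [this]; exact ih _

theorem pvMinsel_spec (g : Int → Int) (t : List Int) : ∀ (m : Int),
    (m :: t).Pairwise (· < ·) →
    (t.foldl (pvMinsel g) m ∈ m :: t
      ∧ (∀ y ∈ m :: t, g (t.foldl (pvMinsel g) m) ≤ g y)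
      ∧ (∀ y ∈ m :: t, g y = g (t.foldl (pvMinsel g) m) → t.foldl (pvMinsel g) m ≤ y)) := by
  induction t with
  | nil =>
    intro m _
    simp
  | cons x t ih =>
    intro m hp
    simp only [List.foldl_cons]
    have hmx : m < x := (List.pairwise_cons.mp hp).1 x (List.mem_cons_self)
    have hp' : (x :: t).Pairwise (· < ·) := (List.pairwise_cons.mp hp).2
    have hxall : ∀ y ∈ t, x < y := (List.pairwise_cons.mp hp').1
    have hmall : ∀ y ∈ t, m < y := fun y hy => lt_trans hmx (hxall y hy)
    by_cases hc : g x < g m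
    · have hsel : pvMinsel g m x = x := if_pos hc
      rw [hsel]
      obtain ⟨h1, h2, h3⟩ := ih x hp'
      refine ⟨List.mem_cons_of_mem m h1, ?_, ?_⟩
      · intro y hy
        rcases List.mem_cons.mp hy with h | h
        · subst h; exact le_of_lt (lt_of_le_of_lt (h2 x List.mem_cons_self) hc)
        · exact h2 y h
      · intro y hy hgy
        rcases List.mem_cons.mp hy with h | h
        · exfalso; subst h
          exact absurd hgy (ne_of_gt (lt_of_le_of_lt (h2 x List.mem_cons_self) hc))
        · exact h3 y h hgy
    · have hsel : pvMinsel g m x = m := if_neg hc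
      rw [hsel]
      have hpm : (m :: t).Pairwise (· < ·) := List.pairwise_cons.mpr ⟨hmall, hp'.sublist (List.sublist_cons_self x t)⟩
      obtain ⟨h1, h2, h3⟩ := ih m hpm
      rw [not_lt] at hc
      refine ⟨?_, ?_, ?_⟩
      · rcases List.mem_cons.mp h1 with h | h
        · rw [h]; exact List.mem_cons_self
        · exact List.mem_cons_of_mem m (List.mem_cons_of_mem x h)
      · intro y hy
        rcases List.mem_cons.mp hy with h | h
        · rw [h]; exact h2 m List.mem_cons_self
        · rcases List.mem_cons.mp h with h' | h'
          · rw [h']; exact le_trans (h2 m List.mem_cons_self) hc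
          · exact h2 y (List.mem_cons_of_mem m h')
      · intro y hy hgy
        rcases List.mem_cons.mp hy with h | h
        · exact le_trans (h3 m List.mem_cons_self (h ▸ hgy)) (le_of_eq h.symm)
        · rcases List.mem_cons.mp h with h' | h'
          · rw [h']
            have h4 : g m ≤ g (t.foldl (pvMinsel g) m) := by rw [← hgy, h']; exact hc
            have heq : g m = g (t.foldl (pvMinsel g) m) :=
              le_antisymm h4 (h2 m List.mem_cons_self)
            have hMm : t.foldl (pvMinsel g) m ≤ m := h3 m List.mem_cons_self heq
            exact le_of_lt (lt_of_le_of_lt hMm hmx)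
          · exact h3 y (List.mem_cons_of_mem m h') hgy

theorem pvMaxsel_spec (k1 k2 : Int → Int) (t : List Int) : ∀ (m : Int),
    (t.foldl (pvMaxsel k1 k2) m ∈ m :: t
      ∧ (∀ y ∈ m :: t, k1 y < k1 (t.foldl (pvMaxsel k1 k2) m)
          ∨ (k1 y = k1 (t.foldl (pvMaxsel k1 k2) m) ∧ k2 y ≤ k2 (t.foldl (pvMaxsel k1 k2) m)))) := by
  induction t with
  | nil =>
    intro m
    refine ⟨List.mem_singleton.mpr rfl, ?_⟩
    intro y hy; rw [List.mem_singleton.mp hy]; simp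
  | cons x t ih =>
    intro m
    simp only [List.foldl_cons]
    obtain ⟨h1, h2⟩ := ih (pvMaxsel k1 k2 m x)
    have hsel : pvMaxsel k1 k2 m x = m ∨ pvMaxsel k1 k2 m x = x := by
      unfold pvMaxsel; split_ifs <;> simp
    have hlexm : k1 m < k1 (pvMaxsel k1 k2 m x)
        ∨ (k1 m = k1 (pvMaxsel k1 k2 m x) ∧ k2 m ≤ k2 (pvMaxsel k1 k2 m x)) := by
      unfold pvMaxsel; split_ifs with hcond
      · simp only [Bool.or_eq_true, Bool.and_eq_true, decide_eq_true_eq, Bool.not_eq_true',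
          decide_eq_false_iff_not, not_lt] at hcond
        rcases hcond with h | ⟨ha, hb⟩
        · exact Or.inl h
        · rcases lt_or_eq_of_le ha with h | h
          · exact Or.inl h
          · exact Or.inr ⟨h.symm ▸ rfl, le_of_lt hb⟩
      · simp
    have hlexx : k1 x < k1 (pvMaxsel k1 k2 m x)
        ∨ (k1 x = k1 (pvMaxsel k1 k2 m x) ∧ k2 x ≤ k2 (pvMaxsel k1 k2 m x)) := by
      unfold pvMaxsel; split_ifs with hcond
      · simp
      · simp only [Bool.or_eq_true, Bool.and_eq_true, decide_eq_true_eq, Bool.not_eq_true',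
          decide_eq_false_iff_not, not_lt, not_or, not_and] at hcond
        obtain ⟨ha, hb⟩ := hcond
        rcases lt_or_eq_of_le ha with h | h
        · exact Or.inl h
        · exact Or.inr ⟨h, by have := hb (le_of_eq h.symm); omega⟩
    have htrans : ∀ a b c : Int, (k1 a < k1 b ∨ (k1 a = k1 b ∧ k2 a ≤ k2 b)) →
        (k1 b < k1 c ∨ (k1 b = k1 c ∧ k2 b ≤ k2 c)) →
        (k1 a < k1 c ∨ (k1 a = k1 c ∧ k2 a ≤ k2 c)) := by
      intro a b c hab hbc
      rcases hab with h | ⟨h, h2'⟩ <;> rcases hbc with h' | ⟨h', h2''⟩ <;>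
        first
        | exact Or.inl (by omega)
        | exact Or.inr ⟨by omega, by omega⟩
    have hheadM := h2 (pvMaxsel k1 k2 m x) List.mem_cons_self
    refine ⟨?_, ?_⟩
    · rcases List.mem_cons.mp h1 with h | h
      · rcases hsel with hs | hs <;> rw [h, hs]
        · exact List.mem_cons_self
        · exact List.mem_cons_of_mem m List.mem_cons_self
      · exact List.mem_cons_of_mem m (List.mem_cons_of_mem x h)
    · intro y hy
      rcases List.mem_cons.mp hy with h | h
      · rw [h]; exact htrans _ _ _ hlexm hheadM
      · rcases List.mem_cons.mp h with h' | h'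
        · rw [h']; exact htrans _ _ _ hlexx hheadM
        · exact h2 y (List.mem_cons_of_mem _ h')

theorem pvByteCost_foldl (L : List (Int × Int)) (dflt : Option Int) (n : Int) : ∀ (c0 : Int),
    L.foldl (fun cost wf =>
      if some wf.1 = dflt then cost
      else
        if |wf.1 - n| ≤ 107 then cost + wf.2
        else if |wf.1 - n| ≤ 1131 then cost + wf.2 * 2
        else cost + wf.2 * 5) c0
    = c0 + ((L.filter (fun wf => !(some wf.1 == dflt))).map
        (fun wf => wf.2 * pvPiece (|wf.1 - n|))).sum := by
  induction L with
  | nil => intro c0; simp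
  | cons wf L ih =>
    intro c0
    simp only [List.foldl_cons, List.filter_cons]
    by_cases h : some wf.1 = dflt
    · have hb : (!(some wf.1 == dflt)) = false := by simp [h]
      rw [if_pos h, hb, if_neg (by simp), ih c0]
    · have hb : (!(some wf.1 == dflt)) = true := by simp [h]
      rw [if_neg h, hb, if_pos rfl]
      rw [List.map_cons, List.sum_cons]
      have hp : pvPiece (|wf.1 - n|)
          = if |wf.1 - n| ≤ 107 then 1 else if |wf.1 - n| ≤ 1131 then 2 else 5 := rfl
      rw [hp]
      split_ifs with h1 h2 <;> rw [ih] <;> ring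

theorem pvSum_filter_ne (f : Int → Int) (t : Int) : ∀ (S : List Int), S.Nodup →
    ((S.filter (fun k => !(k == t))).map f).sum
      = (S.map f).sum - (if t ∈ S then f t else 0) := by
  intro S
  induction S with
  | nil => simp
  | cons x S ih =>
    intro hnd
    rw [List.filter_cons]
    rcases List.nodup_cons.mp hnd with ⟨hx, hnd'⟩
    by_cases h : x = t
    · have hbeq : (!(x == t)) = false := by simp [h]
      rw [hbeq, if_neg (by simp)]
      rw [ih hnd', if_neg (h ▸ hx), if_pos (by simp [h])]
      simp [h]
    · have hbeq : (!(x == t)) = true := by simp [h]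
      rw [hbeq, if_pos rfl, List.map_cons, List.sum_cons, ih hnd', List.map_cons, List.sum_cons]
      have hiff : (t ∈ x :: S) ↔ (t ∈ S) := by
        constructor
        · intro hm; rcases List.mem_cons.mp hm with h' | h'
          · exact absurd h'.symm h
          · exact h'
        · exact List.mem_cons_of_mem x
      by_cases hmem : t ∈ S
      · rw [if_pos hmem, if_pos (hiff.mpr hmem)]; ring
      · rw [if_neg hmem, if_neg (fun hc => hmem (hiff.mp hc))]; ring

theorem pvByteCost_none (widths : List Int) (n : Int) :
    pvByteCost widths none n = pvBase widths n := by
  unfold pvByteCost pvBase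
  rw [pvByteCost_foldl, PySem.Dict.items_counter]
  rw [List.filter_map, List.map_map]
  have h1 : ((fun wf : Int × Int => !(some wf.1 == (none : Option Int)))
      ∘ (fun k : Int => (k, (List.count k widths : Int)))) = fun _ => true := by
    funext k; simp
  rw [h1, List.filter_true]
  simp only [zero_add]
  exact congrArg _ (List.map_congr_left fun k _ => rfl)

theorem pvByteCost_some (widths : List Int) (n t : Int) :
    pvByteCost widths (some t) n = pvBase widths n - pvRed widths n t := by
  unfold pvByteCost pvBase
  rw [pvByteCost_foldl, PySem.Dict.items_counter]
  rw [List.filter_map, List.map_map]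
  have h1 : ((fun wf : Int × Int => !(some wf.1 == some t))
      ∘ (fun k : Int => (k, (List.count k widths : Int)))) = fun k => !(k == t) := by
    funext k; simp
  rw [h1, pvSum_filter_ne _ t _ (PySem.Set.nodup_ofList widths)]
  simp only [zero_add]
  have h2 : (List.map ((fun wf : Int × Int => wf.2 * pvPiece (|wf.1 - n|))
      ∘ (fun k : Int => (k, (List.count k widths : Int)))) (PySem.Set.ofList widths : List Int))
      = List.map (pvRed widths n) (PySem.Set.ofList widths : List Int) :=
    List.map_congr_left fun k _ => rfl
  rw [h2]
  by_cases hm : t ∈ (PySem.Set.ofList widths : List Int)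
  · rw [if_pos hm]; rfl
  · rw [if_neg hm]
    have hz : pvRed widths n t = 0 := by
      have hc : List.count t widths = 0 :=
        List.count_eq_zero.mpr (fun hc => hm ((PySem.Set.mem_ofList widths t).mpr hc))
      simp [pvRed, hc]
    rw [hz]

theorem pvPiece_pos (d : Int) : 1 ≤ pvPiece d := by
  unfold pvPiece; split_ifs <;> omega

theorem pvPiece_le (d : Int) : pvPiece d ≤ 5 := by
  unfold pvPiece; split_ifs <;> omega

theorem pvRed_nonneg (widths : List Int) (n w : Int) : 0 ≤ pvRed widths n w := by
  unfold pvRed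
  have := pvPiece_pos (|w - n|)
  positivity

theorem pvRed_pos_of_mem (widths : List Int) (n w : Int) (h : w ∈ widths) :
    1 ≤ pvRed widths n w := by
  unfold pvRed
  have h1 : 1 ≤ (widths.count w : Int) := by
    have := List.count_pos_iff.mpr h
    omega
  have h2 := pvPiece_pos (|w - n|)
  nlinarith

theorem pvMem_of_red_pos (widths : List Int) (n y : Int) (h : 0 < pvRed widths n y) :
    y ∈ widths := by
  by_contra hc
  have : widths.count y = 0 := List.count_eq_zero.mpr hc
  unfold pvRed at h
  rw [this] at h
  simp at h

theorem pvCount_sum (widths : List Int) :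
    (((PySem.Set.ofList widths : List Int)).map (fun k => (widths.count k : Int))).sum
      = (widths.length : Int) := by
  have hperm : (PySem.Set.ofList widths : List Int).Perm widths.dedup :=
    (List.perm_ext_iff_of_nodup (PySem.Set.nodup_ofList widths) widths.nodup_dedup).mpr
      (fun a => by rw [PySem.Set.mem_ofList, List.mem_dedup])
  rw [(hperm.map (fun k => (widths.count k : Int))).sum_eq]
  have : (widths.dedup.map (fun k => (widths.count k : Int))).sum
      = ((widths.dedup.map (fun k => widths.count k)).sum : Int) := by
    induction widths.dedup with
    | nil => simp
    | cons x t ih => simp only [List.map_cons, List.sum_cons, ih]; push_cast; ring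
  rw [this, List.sum_map_count_dedup_eq_length]

theorem pvBase_le (widths : List Int) (n : Int) :
    pvBase widths n ≤ 5 * (widths.length : Int) := by
  unfold pvBase
  have h1 : ((PySem.Set.ofList widths : List Int).map (pvRed widths n)).sum
      ≤ ((PySem.Set.ofList widths : List Int).map (fun k => (widths.count k : Int) * 5)).sum := by
    apply List.sum_le_sum
    intro k _
    unfold pvRed
    have h2 := pvPiece_le (|k - n|)
    have h3 : (0 : Int) ≤ (widths.count k : Int) := by positivity
    nlinarith
  have h4 : ((PySem.Set.ofList widths : List Int).map (fun k => (widths.count k : Int) * 5)).sum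
      = (((PySem.Set.ofList widths : List Int)).map (fun k => (widths.count k : Int))).sum * 5 := by
    induction (PySem.Set.ofList widths : List Int) with
    | nil => simp
    | cons x t ih => simp only [List.map_cons, List.sum_cons, ih]; ring
  rw [h4, pvCount_sum widths] at h1
  omega

-- the max2? selection: membership and lex-maximality of pvW
theorem pvW_spec (widths : List Int) (hw : widths ≠ []) (n : Int) :
    PySem.List.max2? (PySem.Set.ofList widths : List Int)
        (fun w => pvRed widths n w) (fun w => -w) = some (pvW widths n)
      ∧ pvW widths n ∈ widths
      ∧ (∀ y ∈ widths, pvRed widths n y < pvRed widths n (pvW widths n)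
          ∨ (pvRed widths n y = pvRed widths n (pvW widths n) ∧ pvW widths n ≤ y)) := by
  obtain ⟨x, ws, hx⟩ := List.exists_cons_of_ne_nil hw
  have hSne : (PySem.Set.ofList widths : List Int) ≠ [] := by
    intro hS
    have : x ∈ (PySem.Set.ofList widths : List Int) :=
      (PySem.Set.mem_ofList widths x).mpr (by rw [hx]; exact List.mem_cons_self)
    rw [hS] at this
    exact absurd this (List.not_mem_nil)
  obtain ⟨s0, S', hS⟩ := List.exists_cons_of_ne_nil hSne
  have hcons := pvMax2?_cons (fun w => pvRed widths n w) (fun w => -w) s0 S'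
  have hWdef : pvW widths n = S'.foldl (pvMaxsel (fun w => pvRed widths n w) (fun w => -w)) s0 := by
    unfold pvW; rw [hS, hcons]; rfl
  obtain ⟨hmem, hlex⟩ := pvMaxsel_spec (fun w => pvRed widths n w) (fun w => -w) S' s0
  refine ⟨by rw [hS, hcons, hWdef], ?_, ?_⟩
  · rw [hWdef]
    exact (PySem.Set.mem_ofList widths _).mp (by rw [hS]; exact hmem)
  · intro y hy
    have hyS : y ∈ s0 :: S' := by rw [← hS]; exact (PySem.Set.mem_ofList widths y).mpr hy
    rcases hlex y hyS with h | ⟨h1, h2⟩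
    · exact Or.inl (by rw [hWdef]; exact h)
    · exact Or.inr ⟨by rw [hWdef]; exact h1, by rw [hWdef]; omega⟩

-- ===== VERDICT (by name: the statement is the Claim_ definition above) =====
theorem optimizeWidthsBruteforce_spec : Claim_equal_optimizeWidthsBruteforce := by
  intro widths _ hpre
  unfold Spec_optimizeWidthsBruteforce
  have hw : widths ≠ [] := hpre
  obtain ⟨x0, ws0, hx0⟩ := List.exists_cons_of_ne_nil hw
  -- the three extremal scrutinees exist
  rcases hmin : PySem.List.min? widths (fun x => x) with _ | lo
  · exact absurd ((PySem.List.min?_eq_none_iff _ _).mp hmin) hw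
  rcases hmax : PySem.List.max? widths (fun x => x) with _ | hi
  · exact absurd ((PySem.List.max?_eq_none_iff _ _).mp hmax) hw
  have hvals : (PySem.Dict.counter widths).values
      = (PySem.Set.ofList widths : List Int).map (fun k => (widths.count k : Int)) := by
    simp only [PySem.Dict.values, PySem.Dict.items_counter, List.map_map]
    rfl
  have hx0S : x0 ∈ (PySem.Set.ofList widths : List Int) :=
    (PySem.Set.mem_ofList widths x0).mpr (by rw [hx0]; exact List.mem_cons_self)
  rcases hmx : PySem.List.max? (PySem.Dict.counter widths).values (fun v => v) with _ | mx
  · exfalso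
    have h0 := (PySem.List.max?_eq_none_iff _ _).mp hmx
    rw [hvals] at h0
    rw [List.map_eq_nil_iff.mp h0] at hx0S
    exact absurd hx0S (List.not_mem_nil)
  -- extremal facts
  have hlomem : lo ∈ widths := PySem.List.min?_mem hmin
  have hlomin : ∀ y ∈ widths, lo ≤ y := PySem.List.min?_isMin hmin
  have hhimax : ∀ y ∈ widths, y ≤ hi := PySem.List.max?_isMax hmax
  have hlohi : lo ≤ hi := hhimax lo hlomem
  have hmxmax : ∀ w ∈ widths, (widths.count w : Int) ≤ mx := by
    intro w hwmem
    apply PySem.List.max?_isMax hmx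
    rw [hvals]
    exact List.mem_map_of_mem ((PySem.Set.mem_ofList widths w).mpr hwmem)
  have hredle : ∀ (n w : Int), w ∈ widths → pvRed widths n w ≤ 5 * mx := by
    intro n w hwmem
    have h1 := hmxmax w hwmem
    have h2 := pvPiece_le (|w - n|)
    have h3 := pvPiece_pos (|w - n|)
    have h4 : (0 : Int) ≤ (widths.count w : Int) := by positivity
    unfold pvRed
    nlinarith
  -- the domain
  have hdomcons : PySem.List.pyRange lo (hi + 1) 1
      = lo :: PySem.List.pyRange (lo + 1) (hi + 1) 1 :=
    PySem.List.pyRange_one_cons (by omega)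
  set rest := PySem.List.pyRange (lo + 1) (hi + 1) 1 with hrest
  have hpair : (lo :: rest).Pairwise (· < ·) := by
    rw [← hdomcons]; exact PySem.List.pairwise_lt_pyRange_one lo (hi + 1)
  have hdommem : ∀ y : Int, y ∈ lo :: rest ↔ lo ≤ y ∧ y < hi + 1 := by
    intro y; rw [← hdomcons]; exact PySem.List.mem_pyRange_one
  -- abbreviations
  set g : Int → Int := fun n => pvBase widths n - pvRed widths n (pvW widths n) with hg
  -- per-nominal facts
  have hWdom : ∀ n : Int, pvW widths n ∈ lo :: rest := by
    intro n
    obtain ⟨_, hWmem, _⟩ := pvW_spec widths hw n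
    exact (hdommem _).mpr ⟨hlomin _ hWmem, by have := hhimax _ hWmem; omega⟩
  have hredmax : ∀ (n y : Int), pvRed widths n y ≤ pvRed widths n (pvW widths n) := by
    intro n y
    obtain ⟨_, hWmem, hWlex⟩ := pvW_spec widths hw n
    by_cases hy : y ∈ widths
    · rcases hWlex y hy with h | ⟨h, _⟩ <;> omega
    · have hc : widths.count y = 0 := List.count_eq_zero.mpr hy
      have : pvRed widths n y = 0 := by unfold pvRed; rw [hc]; simp
      have := pvRed_nonneg widths n (pvW widths n)
      omega
  have hglt : ∀ n : Int, g n < (widths.length : Int) * 5 + 1 := by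
    intro n
    have h1 := pvBase_le widths n
    have h2 := pvRed_nonneg widths n (pvW widths n)
    simp only [hg]
    omega
  -- the inner fold over the domain collapses to one selection
  have hinner : ∀ (n : Int) (s : Int × Option Int × Option Int),
      (lo :: rest).foldl (fun s default =>
          if pvByteCost widths (some default) n < s.1
          then (pvByteCost widths (some default) n, some default, some n) else s) s
        = pvStepSel g (fun n => ((some (pvW widths n), some n) : Option Int × Option Int)) s n := by
    intro n s
    refine Eq.trans (pvFoldl_cons_stepSel (fun dflt => pvByteCost widths (some dflt) n)
      (fun dflt => ((some dflt, some n) : Option Int × Option Int)) lo rest s) ?_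
    obtain ⟨hMmem, hMmin, hMfirst⟩ :=
      pvMinsel_spec (fun dflt => pvByteCost widths (some dflt) n) rest lo hpair
    set M := rest.foldl (pvMinsel (fun dflt => pvByteCost widths (some dflt) n)) lo with hM
    obtain ⟨_, hWmem, hWlex⟩ := pvW_spec widths hw n
    have hWd := hWdom n
    -- the two choices agree
    have hgeq : pvByteCost widths (some M) n = pvByteCost widths (some (pvW widths n)) n := by
      apply le_antisymm (hMmin _ hWd)
      rw [pvByteCost_some, pvByteCost_some]
      have := hredmax n M
      omega
    have hMW : M = pvW widths n := by
      apply le_antisymm (hMfirst _ hWd hgeq.symm)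
      have hredeq : pvRed widths n M = pvRed widths n (pvW widths n) := by
        rw [pvByteCost_some, pvByteCost_some] at hgeq
        omega
      have hMmemw : M ∈ widths := by
        apply pvMem_of_red_pos widths n
        have := pvRed_pos_of_mem widths n _ hWmem
        omega
      rcases hWlex M hMmemw with h | ⟨_, h⟩
      · omega
      · exact h
    unfold pvStepSel
    rw [hMW]
    beta_reduce
    rw [pvByteCost_some]
  -- the outer loop body is the same selection, pruning included
  have houter : ∀ (s : Int × Option Int × Option Int) (n : Int),
      (if pvByteCost widths none n > s.1 + 5 * mx then s
       else (lo :: rest).foldl (fun s default =>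
          if pvByteCost widths (some default) n < s.1
          then (pvByteCost widths (some default) n, some default, some n) else s) s)
        = pvStepSel g (fun n => ((some (pvW widths n), some n) : Option Int × Option Int)) s n := by
    intro s n
    by_cases hpr : pvByteCost widths none n > s.1 + 5 * mx
    · rw [if_pos hpr]
      rw [pvByteCost_none] at hpr
      obtain ⟨_, hWmem, _⟩ := pvW_spec widths hw n
      have h1 := hredle n _ hWmem
      unfold pvStepSel
      rw [if_neg (by simp only [hg]; omega)]
    · rw [if_neg hpr]
      exact hinner n s
  -- the outer fold collapses
  have hn0 : PySem.List.min? (lo :: rest) g = some (rest.foldl (pvMinsel g) lo) :=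
    pvMin?_cons g lo rest
  set n0 := rest.foldl (pvMinsel g) lo with hn0def
  have hfold : (lo :: rest).foldl (fun s nominal =>
      if pvByteCost widths none nominal > s.1 + 5 * mx then s
      else (lo :: rest).foldl (fun s default =>
          if pvByteCost widths (some default) nominal < s.1
          then (pvByteCost widths (some default) nominal, some default, some nominal) else s) s)
      (((widths.length : Int) * 5 + 1, none, none) : Int × Option Int × Option Int)
      = ((g n0, some (pvW widths n0), some n0) : Int × Option Int × Option Int) := by
    refine Eq.trans (List.foldl_ext _ (fun (s : Int × Option Int × Option Int) (n : Int) =>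
        if g n < s.1 then (g n, (some (pvW widths n), some n)) else s)
      (((widths.length : Int) * 5 + 1, none, none) : Int × Option Int × Option Int)
      (fun a b _ => houter a b)) ?_
    refine Eq.trans (pvFoldl_cons_stepSel g
      (fun n => ((some (pvW widths n), some n) : Option Int × Option Int)) lo rest _) ?_
    unfold pvStepSel
    rw [if_pos (hglt n0)]
  -- evaluate port A
  have hA : optimizeWidthsBruteforce widths = (pvW widths n0, n0) := by
    simp only [optimizeWidthsBruteforce, hmx, hmin, hmax, hdomcons]
    rw [hfold]
    rfl
  -- evaluate port B
  have hcand : ∀ n : Int, pvCandidate (PySem.Dict.counter widths) n = (g n, n, pvW widths n) := by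
    intro n
    unfold pvCandidate
    have hbase : (PySem.Dict.counter widths).items.foldl
        (fun b wf => b + wf.2 * pvPiece (|wf.1 - n|)) 0 = pvBase widths n := by
      rw [PySem.List.foldl_add, PySem.Dict.items_counter, List.map_map]
      simp only [zero_add]
      exact congrArg _ (List.map_congr_left fun k _ => rfl)
    have hk1 : (fun w => (PySem.Dict.counter widths).getD w 0 * pvPiece (|w - n|))
        = fun w => pvRed widths n w := by
      funext w; rw [PySem.Dict.getD_counter]; rfl
    have hkeys : (PySem.Dict.counter widths).keys = (PySem.Set.ofList widths : List Int) :=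
      PySem.Dict.keys_counter widths
    obtain ⟨hW2, _, _⟩ := pvW_spec widths hw n
    rw [hbase, hkeys, hk1, hW2]
    simp only []
    rw [hg, PySem.Dict.getD_counter]
    rfl
  have hB : optimizeWidthsBruteforce_alt widths = (pvW widths n0, n0) := by
    simp only [optimizeWidthsBruteforce_alt, hmin, hmax, Option.bind_some]
    rw [hdomcons, List.map_congr_left (fun n _ => hcand n), pvMin?_map
      (fun n => ((g n, n, pvW widths n) : Int × Int × Int)) (fun t => t.1) (lo :: rest)]
    have : (fun x : Int => ((g x, x, pvW widths x) : Int × Int × Int).1) = g := rfl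
    rw [this, hn0]
    rfl
  rw [hA, hB]
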